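-- pv_equiv track=rewrite | github.com/StevenCellist/FJSP-with-APP-using-CP-and-MDD-thesis | src/mdd-astar/main.py | levelList
-- ===== SOURCE A (Python) =====
-- def levelList(lst, value):
--     # Pair each element with its original index
--     indexed_lst = [(v, i) for i, v in enumerate(lst)]
--
--     # Sort the list based on values
--     indexed_lst.sort()
--     n = len(indexed_lst)
--
--     # Incrementally level elements until we exhaust the value
--     i = 0
--     while value > 0 and i < n - 1:
--         # Determine the difference to the next element in the sorted list
--         diff = indexed_lst[i + 1][0] - indexed_lst[i][0]
--         # Total amount needed to make indexed_lst[i] equal to indexed_lst[i+1]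
--         required = diff * (i + 1)
--
--         if value >= required:
--             # Level up all elements from 0 to i to the level of indexed_lst[i+1]
--             for j in range(i + 1):
--                 indexed_lst[j] = (indexed_lst[j][0] + diff, indexed_lst[j][1])
--             value -= required
--         else:
--             # Distribute the remaining value equally among elements from 0 to i
--             equal_share = value // (i + 1)
--             remainder = value % (i + 1)
--
--             for j in range(i + 1):
--                 indexed_lst[j] = (indexed_lst[j][0] + equal_share, indexed_lst[j][1])
--             for j in range(remainder):
--                 indexed_lst[j] = (indexed_lst[j][0] + 1, indexed_lst[j][1])
--
--             value = 0
--         i += 1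
--
--     # If there's any value left, distribute it among all elements
--     if value > 0:
--         equal_share = value // n
--         remainder = value % n
--
--         for j in range(n):
--             indexed_lst[j] = (indexed_lst[j][0] + equal_share, indexed_lst[j][1])
--         for j in range(remainder):
--             indexed_lst[j] = (indexed_lst[j][0] + 1, indexed_lst[j][1])
--
--     # Restore the original order based on the indices
--     indexed_lst.sort(key=lambda x: x[1])
--
--     # Extract the leveled values
--     leveled_lst = [val for val, _ in indexed_lst]
--
--     return leveled_lst
-- ===== SOURCE B (Python) =====
-- def levelList(lst, value):
--     if value <= 0:
--         return list(lst)
--     pairs = sorted((v, i) for i, v in enumerate(lst))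
--     n = len(pairs)
--     # One pass over the sorted values: k = number of elements that share the final
--     # level, spent = cost of raising the first k up to pairs[k-1][0].
--     k = 1
--     spent = 0
--     prefix = pairs[0][0]
--     for m in range(2, n + 1):
--         c = m * pairs[m - 1][0] - (prefix + pairs[m - 1][0])
--         if c > value:
--             break
--         k = m
--         spent = c
--         prefix += pairs[m - 1][0]
--     base, rem = divmod(value - spent, k)
--     base += pairs[k - 1][0]
--     leveled = [(base + 1, idx) if j < rem else ((base, idx) if j < k else (v, idx))
--                for j, (v, idx) in enumerate(pairs)]
--     leveled.sort(key=lambda x: x[1])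
--     return [v for v, _ in leveled]
-- ===== Notes on version B (the rewrite author's own statement) =====
-- stated objective: faster
-- what changed: A levels the sorted values step by step, bumping the first i+1 elements at every step (quadratic); B sorts once, finds the final water level with a single prefix-sum scan (k elements share the level) and assigns the result directly.
import Mathlib
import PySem

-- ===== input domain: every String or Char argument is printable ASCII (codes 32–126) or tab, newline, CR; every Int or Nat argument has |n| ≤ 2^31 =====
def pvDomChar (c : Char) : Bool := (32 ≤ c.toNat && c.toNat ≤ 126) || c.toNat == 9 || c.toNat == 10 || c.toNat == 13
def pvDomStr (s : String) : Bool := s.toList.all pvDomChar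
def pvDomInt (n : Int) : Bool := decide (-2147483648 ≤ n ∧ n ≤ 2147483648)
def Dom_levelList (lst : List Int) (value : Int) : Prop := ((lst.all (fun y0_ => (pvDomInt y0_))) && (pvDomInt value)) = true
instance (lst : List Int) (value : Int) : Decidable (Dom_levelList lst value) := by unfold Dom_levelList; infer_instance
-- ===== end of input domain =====

-- B replaces A's step-by-step leveling loop by one pfx-sum scan that finds the final
-- water level directly (asymptotically faster); equivalence of the RETURN values is proved
-- on Pre_ (A mutates no argument: it builds a fresh pair list).

-- ===== PORT A =====
-- 'for j in range(m): lst[j] = (lst[j][0] + d, lst[j][1])' — shared by A's three bump loops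
def addFirst (m d : Int) (p : List (Int × Int)) : List (Int × Int) :=
  (PySem.List.pyRange 0 m 1).foldl
    (fun acc j => PySem.List.pySetD acc j
      ((PySem.List.pyGetD acc j (0, 0)).1 + d, (PySem.List.pyGetD acc j (0, 0)).2)) p

-- the while loop; fuel = (n-1) - i mirrors the guard 'i < n - 1', i increases by 1 each pass
def lvlLoop (p : List (Int × Int)) (v : Int) (i : Int) : Nat → List (Int × Int) × Int
  | 0 => (p, v)
  | fuel + 1 =>
    if 0 < v then
      let diff := (PySem.List.pyGetD p (i + 1) (0, 0)).1 - (PySem.List.pyGetD p i (0, 0)).1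
      let required := diff * (i + 1)
      if required ≤ v then
        lvlLoop (addFirst (i + 1) diff p) (v - required) (i + 1) fuel
      else
        lvlLoop (addFirst (PySem.Int.mod v (i + 1)) 1
                  (addFirst (i + 1) (PySem.Int.floordiv v (i + 1)) p)) 0 (i + 1) fuel
    else (p, v)

def levelList (lst : List Int) (value : Int) : List Int :=
  let indexed₀ := (PySem.List.enumerate lst).map (fun iv => (iv.2, iv.1))
  -- tuple sort (value, index): PySem.List.sorted2 is Python's sort under the pair key
  let indexed₁ := PySem.List.sorted2 indexed₀ Prod.fst Prod.snd
  let n := indexed₁.length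
  let pv := lvlLoop indexed₁ value 0 (n - 1)
  let indexed₂ :=
    if 0 < pv.2 then
      addFirst (PySem.Int.mod pv.2 (n : Int)) 1
        (addFirst (n : Int) (PySem.Int.floordiv pv.2 (n : Int)) pv.1)
    else pv.1
  let indexed₃ := PySem.List.sorted indexed₂ (fun x => x.2)
  indexed₃.map (fun x => x.1)

-- ===== PORT B =====
-- 'for m in range(2, n+1): … if c > value: break …' — the pfx-sum scan with break
def scanLoop (pairs : List (Int × Int)) (value : Int) :
    List Int → Int × Int × Int → Int × Int × Int
  | [], st => st
  | m :: ms, (k, spent, pfx) =>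
    let sm := (PySem.List.pyGetD pairs (m - 1) (0, 0)).1
    let c := m * sm - (pfx + sm)
    if value < c then (k, spent, pfx)
    else scanLoop pairs value ms (m, c, pfx + sm)

def levelList_alt (lst : List Int) (value : Int) : List Int :=
  if value ≤ 0 then lst
  else
    let pairs := PySem.List.sorted2
      ((PySem.List.enumerate lst).map (fun iv => (iv.2, iv.1))) Prod.fst Prod.snd
    let n := pairs.length
    let st := scanLoop pairs value (PySem.List.pyRange 2 ((n : Int) + 1) 1)
      (1, 0, (PySem.List.pyGetD pairs 0 (0, 0)).1)
    let k := st.1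
    let spent := st.2.1
    let base := PySem.Int.floordiv (value - spent) k + (PySem.List.pyGetD pairs (k - 1) (0, 0)).1
    let rem := PySem.Int.mod (value - spent) k
    let leveled₀ := (PySem.List.enumerate pairs).map (fun jx =>
      if jx.1 < rem then (base + 1, jx.2.2) else if jx.1 < k then (base, jx.2.2) else jx.2)
    let leveled₁ := PySem.List.sorted leveled₀ (fun x => x.2)
    leveled₁.map (fun x => x.1)

-- ===== PRECONDITION & SPEC =====
-- Pre_ excludes only lst = [] with value > 0, where A raises ZeroDivisionError (value // n with n = 0).
def Pre_levelList (lst : List Int) (value : Int) : Prop := lst ≠ [] ∨ value ≤ 0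
instance (lst : List Int) (value : Int) : Decidable (Pre_levelList lst value) := by
  unfold Pre_levelList; infer_instance

def pvWitness_levelList : List Int × Int := ([4, 0, 2, 0], 5)

def Spec_levelList (lst : List Int) (value : Int) (out : List Int) : Prop :=
  out = levelList_alt lst value
instance (lst : List Int) (value : Int) (out : List Int) : Decidable (Spec_levelList lst value out) := by
  unfold Spec_levelList; infer_instance

-- ===== CLAIM (what is proved, stated in full; the proofs are below) =====
def Claim_equal_levelList : Prop := ∀ (lst : List Int) (value : Int), Dom_levelList lst value →
  Pre_levelList lst value → Spec_levelList lst value (levelList lst value)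

-- ===== LEMMAS AND PROOFS =====

-- proof-side abbreviations over the sorted pair list q
-- value of the j-th sorted element
def sVal (q : List (Int × Int)) (j : Nat) : Int := (q.getD j (0, 0)).1
-- sum of the first m sorted values
def preSum (q : List (Int × Int)) (m : Nat) : Int := ((q.take m).map (fun x => x.1)).sum
-- cost of raising the first m sorted elements to the level of the m-th (1 ≤ m)
def Cc (q : List (Int × Int)) (m : Nat) : Int := (m : Int) * sVal q (m - 1) - preSum q m
-- first m elements replaced by level c (keeping indices)
def levelAll (q : List (Int × Int)) (m : Nat) (c : Int) : List (Int × Int) :=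
  (q.take m).map (fun x => (c, x.2)) ++ q.drop m
-- B's direct assignment (definitionally the list comprehension of the B port)
def assignK (q : List (Int × Int)) (base rem k : Int) : List (Int × Int) :=
  (PySem.List.enumerate q).map (fun jx =>
    if jx.1 < rem then (base + 1, jx.2.2) else if jx.1 < k then (base, jx.2.2) else jx.2)


theorem sorted2_eq_sorted_lex (xs : List (Int × Int)) :
    PySem.List.sorted2 xs Prod.fst Prod.snd = PySem.List.sorted xs (fun x => (toLex x : Int ×ₗ Int)) := by
  rw [PySem.List.sorted_eq_foldl_insertBy]
  unfold PySem.List.sorted2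
  simp only [if_neg (by decide : ¬ (false = true))]
  congr 1
  funext acc x
  congr 1
  funext a b
  have h : (toLex a < toLex b) ↔ (a.1 < b.1 ∨ a.1 = b.1 ∧ a.2 < b.2) := Prod.Lex.lt_iff
  rw [show decide (toLex a < toLex b) = decide (a.1 < b.1 ∨ a.1 = b.1 ∧ a.2 < b.2) by simp [h]]
  by_cases h1 : a.1 < b.1 <;> by_cases h2 : b.1 < a.1 <;> by_cases h3 : a.2 < b.2 <;>
    simp [h1, h2, h3] <;> omega

theorem restore_eq (lst : List Int) :
    PySem.List.sorted
      (PySem.List.sorted2 ((PySem.List.enumerate lst).map (fun iv => (iv.2, iv.1))) Prod.fst Prod.snd)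
      (fun x => x.2) = (PySem.List.enumerate lst).map (fun iv => (iv.2, iv.1)) := by
  apply PySem.List.sorted_eq_of_perm_of_pairwise_lt
  · exact (PySem.List.sorted2_perm _ _ _ _).symm
  · rw [List.pairwise_map]
    exact (PySem.List.pairwise_lt_enumerate lst 0).imp (fun h => h)

theorem pairwise_fst_sorted2 (xs : List (Int × Int)) :
    (PySem.List.sorted2 xs Prod.fst Prod.snd).Pairwise (fun a b => a.1 ≤ b.1) := by
  rw [sorted2_eq_sorted_lex]
  exact (PySem.List.sorted_pairwise _ _).imp (fun h => by
    rcases Prod.Lex.le_iff.1 h with h1 | ⟨h1, _⟩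
    · exact le_of_lt h1
    · exact le_of_eq h1)

theorem addFirst_eq (p : List (Int × Int)) (m : Nat) (d : Int) (hm : m ≤ p.length) :
    addFirst (m : Int) d p = (p.take m).map (fun x => (x.1 + d, x.2)) ++ p.drop m := by
  induction m with
  | zero => simp [addFirst, PySem.List.pyRange_one_eq_nil]
  | succ k ih =>
    have hk : k ≤ p.length := Nat.le_of_succ_le hm
    have hrange : PySem.List.pyRange 0 ((k:Int)+1) 1 = PySem.List.pyRange 0 (k:Int) 1 ++ [(k:Int)] :=
      PySem.List.pyRange_one_succ_right (by positivity)
    have : addFirst ((k:Nat)+1 : Int) d p = PySem.List.pySetD (addFirst k d p) (k:Int)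
        ((PySem.List.pyGetD (addFirst k d p) (k:Int) (0,0)).1 + d,
         (PySem.List.pyGetD (addFirst k d p) (k:Int) (0,0)).2) := by
      unfold addFirst
      rw [show ((k:Nat)+1 : Int) = (k:Int)+1 by ring, hrange, List.foldl_append]
      simp
    rw [show ((k+1 : Nat) : Int) = (k:Int)+1 by push_cast; ring] at *
    rw [this, ih hk]
    have hlt : k < p.length := hm
    have hget : (((p.take k).map (fun x => (x.1 + d, x.2)) ++ p.drop k).getD k (0,0)) = p[k] := by
      have hlen : ((p.take k).map (fun x : Int × Int => (x.1 + d, x.2))).length = k := by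
        simp [List.length_take]; omega
      rw [List.getD_eq_getElem?_getD]
      rw [List.getElem?_append_right (by omega)]
      rw [hlen, Nat.sub_self, List.getElem?_drop, Nat.add_zero]
      simp [hlt]
    simp only [PySem.List.pyGetD_natCast, PySem.List.pySetD_natCast, hget]
    -- now: set k on the concatenation
    have hlen : ((p.take k).map (fun x : Int × Int => (x.1 + d, x.2))).length = k := by
      simp [List.length_take]; omega
    rw [List.set_append_right _ _ (by omega)]
    have hdrop : p.drop k = p[k] :: p.drop (k+1) := List.drop_eq_getElem_cons hlt
    rw [hlen, Nat.sub_self, hdrop]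
    rw [List.set_cons_zero, List.take_add_one, List.getElem?_eq_getElem hlt]
    simp only [List.map_append, List.map_take, Option.toList_some, List.map_cons, List.map_nil,
      List.append_assoc, List.singleton_append]

theorem tmd_length (p : List (Int × Int)) (f : (Int × Int) → (Int × Int)) (m : Nat) (hm : m ≤ p.length) :
    ((p.take m).map f ++ p.drop m).length = p.length := by
  simp; omega

theorem tmd_getElem? (p : List (Int × Int)) (f : (Int × Int) → (Int × Int)) (m : Nat) (hm : m ≤ p.length)
    (j : Nat) : ((p.take m).map f ++ p.drop m)[j]? = if j < m then p[j]?.map f else p[j]? := by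
  by_cases h : j < m
  · rw [if_pos h, List.getElem?_append_left (by simp; omega), List.getElem?_map, List.getElem?_take_of_lt h]
  · rw [if_neg h, List.getElem?_append_right (by simp; omega)]
    simp only [List.length_map, List.length_take, Nat.min_eq_left hm, List.getElem?_drop]
    congr 1; omega

theorem assignK_getElem? (q : List (Int × Int)) (base rem k : Int) (j : Nat) :
    (assignK q base rem k)[j]? = q[j]?.map (fun x =>
      if (j : Int) < rem then (base + 1, x.2) else if (j : Int) < k then (base, x.2) else x) := by
  unfold assignK
  rw [List.getElem?_map, PySem.List.getElem?_enumerate]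
  cases q[j]? <;> simp

theorem sVal_eq (q : List (Int × Int)) (j : Nat) (hj : j < q.length) : sVal q j = q[j].1 := by
  simp [sVal, List.getD_eq_getElem?_getD, List.getElem?_eq_getElem hj]

theorem sVal_mono (q : List (Int × Int)) (hpw : q.Pairwise (fun a b => a.1 ≤ b.1))
    (a b : Nat) (hab : a ≤ b) (hb : b < q.length) : sVal q a ≤ sVal q b := by
  rw [sVal_eq q a (by omega), sVal_eq q b hb]
  rcases Nat.eq_or_lt_of_le hab with h | h
  · subst h; simp
  · exact List.pairwise_iff_getElem.1 hpw a b (by omega) hb h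

theorem preSum_succ (q : List (Int × Int)) (m : Nat) (hm : m < q.length) :
    preSum q (m + 1) = preSum q m + sVal q m := by
  unfold preSum
  rw [List.take_add_one, List.getElem?_eq_getElem hm, sVal_eq q m hm,
    List.map_append, List.sum_append]
  simp

theorem Cc_step (q : List (Int × Int)) (m : Nat) (h1 : 1 ≤ m) (hm : m < q.length) :
    Cc q (m + 1) = Cc q m + (m : Int) * (sVal q m - sVal q (m - 1)) := by
  unfold Cc
  rw [preSum_succ q m hm]
  have : (m + 1) - 1 = m := by omega
  rw [this]
  push_cast
  ring

theorem Cc_mono (q : List (Int × Int)) (hpw : q.Pairwise (fun a b => a.1 ≤ b.1))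
    (a b : Nat) (h1 : 1 ≤ a) (hab : a ≤ b) (hb : b ≤ q.length) : Cc q a ≤ Cc q b := by
  induction b with
  | zero => omega
  | succ n ih =>
    rcases Nat.eq_or_lt_of_le hab with h | h
    · subst h; simp
    · have hn : a ≤ n := by omega
      have h2 : Cc q a ≤ Cc q n := ih hn (by omega)
      have h3 : Cc q n ≤ Cc q (n + 1) := by
        rw [Cc_step q n (by omega) (by omega)]
        have := sVal_mono q hpw (n - 1) n (by omega) (by omega)
        nlinarith [this]
      omega

theorem sVal_const_of_Cc_eq (q : List (Int × Int)) (hpw : q.Pairwise (fun a b => a.1 ≤ b.1))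
    (a b : Nat) (h1 : 1 ≤ a) (hab : a ≤ b) (hb : b ≤ q.length) (hC : Cc q a = Cc q b)
    (j : Nat) (hj1 : a - 1 ≤ j) (hj2 : j ≤ b - 1) : sVal q j = sVal q (a - 1) := by
  have hs : sVal q (a - 1) ≤ sVal q j := sVal_mono q hpw (a - 1) j hj1 (by omega)
  have hs2 : sVal q j ≤ sVal q (b - 1) := sVal_mono q hpw j (b - 1) hj2 (by omega)
  -- Cc a = Cc b forces the values s_{a-1} .. s_{b-1} all equal
  have key : ∀ t : Nat, a ≤ t → t ≤ b → Cc q t = Cc q a → sVal q (t - 1) = sVal q (a - 1) := by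
    intro t
    induction t with
    | zero => intro h; omega
    | succ n ih =>
      intro hat hnb hCt
      rcases Nat.eq_or_lt_of_le hat with h | h
      · rw [← h]
      · have hn1 : a ≤ n := by omega
        have hCa : Cc q a ≤ Cc q n := Cc_mono q hpw a n (by omega) hn1 (by omega)
        have hCn : Cc q n ≤ Cc q (n + 1) := by
          rw [Cc_step q n (by omega) (by omega)]
          nlinarith [sVal_mono q hpw (n - 1) n (by omega) (by omega)]
        have hCeq : Cc q n = Cc q a := by omega
        have hprev : sVal q (n - 1) = sVal q (a - 1) := ih hn1 (by omega) hCeq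
        have hstep : Cc q (n + 1) = Cc q n + (n : Int) * (sVal q n - sVal q (n - 1)) :=
          Cc_step q n (by omega) (by omega)
        have hzero : (n : Int) * (sVal q n - sVal q (n - 1)) = 0 := by omega
        have : sVal q n = sVal q (n - 1) := by
          have hn0 : (1:Int) ≤ (n : Int) := by exact_mod_cast Nat.one_le_cast.2 (by omega : 1 ≤ n)
          nlinarith [sVal_mono q hpw (n - 1) n (by omega) (by omega)]
        simpa [this] using hprev
  have hb' : Cc q b = Cc q a := hC.symm
  -- now j with a-1 ≤ j ≤ b-1: sVal q j = sVal q ((j+1)-1) with a ≤ j+1 ≤ b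
  have := key (j + 1) (by omega) (by omega) ?_
  · simpa using this
  · have h1' : Cc q a ≤ Cc q (j + 1) := Cc_mono q hpw a (j + 1) h1 (by omega) (by omega)
    have h2' : Cc q (j + 1) ≤ Cc q b := Cc_mono q hpw (j + 1) b (by omega) (by omega) hb
    omega

theorem scan_spec (q : List (Int × Int)) (value : Int) :
    ∀ (d m₀ : Nat), q.length - m₀ = d → 1 ≤ m₀ → m₀ ≤ q.length → Cc q m₀ ≤ value →
    ∃ k : Nat, m₀ ≤ k ∧ k ≤ q.length ∧ Cc q k ≤ value ∧ (k = q.length ∨ value < Cc q (k + 1)) ∧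
      scanLoop q value (PySem.List.pyRange ((m₀ : Int) + 1) ((q.length : Int) + 1) 1)
        ((m₀ : Int), Cc q m₀, preSum q m₀) = ((k : Int), Cc q k, preSum q k) := by
  intro d
  induction d with
  | zero =>
    intro m₀ hd h1 hn hc
    have hm : m₀ = q.length := by omega
    refine ⟨m₀, le_refl _, hn, hc, Or.inl hm, ?_⟩
    rw [PySem.List.pyRange_one_eq_nil (by omega)]
    rfl
  | succ d ih =>
    intro m₀ hd h1 hn hc
    have hlt : m₀ < q.length := by omega
    rw [PySem.List.pyRange_one_cons (by omega)]
    have hsm : (PySem.List.pyGetD q ((m₀:Int) + 1 - 1) (0, 0)).1 = sVal q m₀ := by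
      have : (m₀:Int) + 1 - 1 = ((m₀:Nat) : Int) := by ring
      rw [this, PySem.List.pyGetD_natCast]
      rfl
    have hc1 : ((m₀:Int)+1) * sVal q m₀ - (preSum q m₀ + sVal q m₀) = Cc q (m₀+1) := by
      unfold Cc
      rw [preSum_succ q m₀ hlt]
      have : m₀ + 1 - 1 = m₀ := by omega
      rw [this]
      push_cast; ring
    by_cases hbr : value < Cc q (m₀ + 1)
    · refine ⟨m₀, le_refl _, by omega, hc, Or.inr hbr, ?_⟩
      simp only [scanLoop, hsm]
      rw [hc1, if_pos hbr]
    · have ⟨k, hk1, hk2, hk3, hk4, hk5⟩ := ih (m₀+1) (by omega) (by omega) (by omega) (by omega)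
      refine ⟨k, by omega, hk2, hk3, hk4, ?_⟩
      simp only [scanLoop, hsm]
      rw [hc1, if_neg hbr]
      rw [show preSum q m₀ + sVal q m₀ = preSum q (m₀+1) from (preSum_succ q m₀ hlt).symm,
        show (m₀:Int) + 1 + 1 = ((m₀+1 : Nat) : Int) + 1 by push_cast; ring,
        show (m₀:Int) + 1 = ((m₀+1 : Nat) : Int) by push_cast; ring]
      exact hk5

theorem distribute_eq (q : List (Int × Int)) (k : Nat) (value : Int)
    (h1 : 1 ≤ k) (hk : k ≤ q.length) (_hv : 0 ≤ value - Cc q k) :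
    addFirst (PySem.Int.mod (value - Cc q k) (k : Int)) 1
      (addFirst (k : Int) (PySem.Int.floordiv (value - Cc q k) (k : Int)) (levelAll q k (sVal q (k - 1)))) =
    assignK q (PySem.Int.floordiv (value - Cc q k) (k : Int) + sVal q (k - 1))
      (PySem.Int.mod (value - Cc q k) (k : Int)) (k : Int) := by
  have hkpos : (0 : Int) < (k : Int) := by exact_mod_cast h1
  have hrem0 : 0 ≤ PySem.Int.mod (value - Cc q k) (k : Int) := PySem.Int.mod_nonneg _ hkpos
  have hremk : PySem.Int.mod (value - Cc q k) (k : Int) < (k : Int) := PySem.Int.mod_lt _ hkpos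
  have hrcast : ((PySem.Int.mod (value - Cc q k) (k : Int)).toNat : Int) = PySem.Int.mod (value - Cc q k) (k : Int) :=
    Int.toNat_of_nonneg hrem0
  have hrk : (PySem.Int.mod (value - Cc q k) (k : Int)).toNat < k := by omega
  have hlen1 : (levelAll q k (sVal q (k - 1))).length = q.length := tmd_length q _ k hk
  rw [addFirst_eq _ k _ (by omega), ← hrcast, addFirst_eq _ _ 1 (by
    rw [tmd_length _ _ k (by rw [hlen1]; exact hk)]
    rw [hlen1]; omega)]
  apply List.ext_getElem?
  intro j
  unfold levelAll
  rw [tmd_getElem? _ _ _ (by rw [tmd_length _ _ k (by simp; omega)]; simp; omega),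
      tmd_getElem? _ _ k (by simp; omega),
      tmd_getElem? _ _ k (by omega),
      assignK_getElem?]
  by_cases hjq : j < q.length
  · rw [List.getElem?_eq_getElem hjq]
    have hjr : ((j:Int) < PySem.Int.mod (value - Cc q k) (k : Int)) ↔ j < (PySem.Int.mod (value - Cc q k) (k : Int)).toNat := by omega
    have hjk : ((j:Int) < (k:Int)) ↔ j < k := by exact_mod_cast Nat.cast_lt
    split_ifs with a b c d e <;> simp only [Option.map_some, Option.some.injEq]
    all_goals try (exfalso; omega)
    all_goals (simp only [Prod.mk.injEq]; exact ⟨by ring, trivial⟩)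
  · have : q[j]? = none := List.getElem?_eq_none (by omega)
    rw [this]
    simp

theorem exhausted_eq (q : List (Int × Int)) (i k : Nat)
    (hpw : q.Pairwise (fun a b => a.1 ≤ b.1))
    (hi : i + 1 ≤ k) (hk : k ≤ q.length) (hC : Cc q (i + 1) = Cc q k) :
    levelAll q (i + 1) (sVal q i) =
      assignK q (PySem.Int.floordiv 0 (k : Int) + sVal q (k - 1)) (PySem.Int.mod 0 (k : Int)) (k : Int) := by
  have hkpos : (0 : Int) < (k : Int) := by exact_mod_cast (by omega : 0 < k)
  have hfd : PySem.Int.floordiv 0 (k : Int) = 0 := by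
    rw [PySem.Int.floordiv_eq_ediv_of_pos hkpos]; exact Int.zero_ediv _
  have hmd : PySem.Int.mod 0 (k : Int) = 0 := by
    rw [PySem.Int.mod_eq_emod_of_pos hkpos]; exact Int.zero_emod _
  rw [hfd, hmd, zero_add]
  have hsk : sVal q (k - 1) = sVal q i := by
    have := sVal_const_of_Cc_eq q hpw (i + 1) k (by omega) hi hk hC (k - 1) (by omega) (by omega)
    simpa using this
  unfold levelAll
  apply List.ext_getElem?
  intro j
  rw [tmd_getElem? _ _ (i + 1) (by omega), assignK_getElem?]
  by_cases hjq : j < q.length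
  · rw [List.getElem?_eq_getElem hjq]
    simp only [Option.map_some]
    have hj0 : ¬ ((j : Int) < 0) := by omega
    by_cases hj1 : j < i + 1
    · rw [if_pos hj1, if_neg hj0, if_pos (by exact_mod_cast Nat.cast_lt.2 (by omega : j < k))]
      rw [hsk]
    · rw [if_neg hj1, if_neg hj0]
      by_cases hj2 : j < k
      · rw [if_pos (by exact_mod_cast Nat.cast_lt.2 hj2)]
        have hv : sVal q j = sVal q i := by
          have := sVal_const_of_Cc_eq q hpw (i + 1) k (by omega) hi hk hC j (by omega) (by omega)
          simpa using this
        rw [hsk, ← hv, sVal_eq q j hjq]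
      · rw [if_neg (by exact_mod_cast fun h => hj2 (Nat.cast_lt.1 h))]
  · rw [List.getElem?_eq_none (by omega)]
    simp

theorem lvlLoop_zero_v (p : List (Int × Int)) (i : Int) (fuel : Nat) :
    lvlLoop p 0 i fuel = (p, 0) := by
  cases fuel <;> simp [lvlLoop]

theorem levelAll_length' (q : List (Int × Int)) (m : Nat) (c : Int) (hm : m ≤ q.length) :
    (levelAll q m c).length = q.length := tmd_length q _ m hm

theorem levelAll_getD (q : List (Int × Int)) (m : Nat) (c : Int) (hm : m ≤ q.length)
    (j : Nat) (hj : j < q.length) :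
    (levelAll q m c).getD j (0, 0) = if j < m then (c, q[j].2) else q[j] := by
  rw [List.getD_eq_getElem?_getD]
  unfold levelAll
  rw [tmd_getElem? q _ m hm j, List.getElem?_eq_getElem hj]
  split_ifs <;> rfl

theorem step_eq (q : List (Int × Int)) (i : Nat) (hi : i + 1 < q.length) :
    ((levelAll q (i + 1) (sVal q i)).take (i + 1)).map
        (fun x => (x.1 + (sVal q (i + 1) - sVal q i), x.2)) ++
      (levelAll q (i + 1) (sVal q i)).drop (i + 1) = levelAll q (i + 2) (sVal q (i + 1)) := by
  apply List.ext_getElem?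
  intro j
  have hlen : (levelAll q (i + 1) (sVal q i)).length = q.length := levelAll_length' q _ _ (by omega)
  rw [tmd_getElem? _ _ (i + 1) (by omega)]
  unfold levelAll
  rw [tmd_getElem? q _ (i + 1) (by omega) j, tmd_getElem? q _ (i + 2) (by omega) j]
  by_cases hjq : j < q.length
  · rw [List.getElem?_eq_getElem hjq]
    by_cases h1 : j < i + 1
    · rw [if_pos h1, if_pos h1, if_pos (by omega)]
      simp only [Option.map_some, Option.some.injEq, Prod.mk.injEq]
      exact ⟨by ring, trivial⟩
    · rw [if_neg h1, if_neg h1]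
      by_cases h2 : j < i + 2
      · have hj : j = i + 1 := by omega
        rw [if_pos h2]
        simp only [Option.map_some, Option.some.injEq]
        subst hj
        rw [sVal_eq q (i + 1) hjq]
      · rw [if_neg h2]
  · rw [List.getElem?_eq_none (by omega)]
    simp

theorem main_lemma (q : List (Int × Int)) (value : Int)
    (hpw : q.Pairwise (fun a b => a.1 ≤ b.1)) :
    ∀ (fuel i : Nat), fuel = q.length - 1 - i → i < q.length → Cc q (i + 1) ≤ value →
    (let pv := lvlLoop (levelAll q (i + 1) (sVal q i)) (value - Cc q (i + 1)) (i : Int) fuel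
     let out := if 0 < pv.2 then
         addFirst (PySem.Int.mod pv.2 (q.length : Int)) 1
           (addFirst (q.length : Int) (PySem.Int.floordiv pv.2 (q.length : Int)) pv.1)
       else pv.1
     let st := scanLoop q value (PySem.List.pyRange ((i : Int) + 2) ((q.length : Int) + 1) 1)
       ((i : Int) + 1, Cc q (i + 1), preSum q (i + 1))
     out = assignK q (PySem.Int.floordiv (value - st.2.1) st.1 +
         (PySem.List.pyGetD q (st.1 - 1) (0, 0)).1) (PySem.Int.mod (value - st.2.1) st.1) st.1) := by
  intro fuel
  induction fuel with
  | zero =>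
    intro i hfuel hi hc
    have hn : i = q.length - 1 := by omega
    have hiq : i + 1 = q.length := by omega
    -- scan runs on the range from i+2 = n+1 : empty
    obtain ⟨k, hk1, hk2, hk3, _hk4, hk5⟩ :=
      scan_spec q value (q.length - (i + 1)) (i + 1) rfl (by omega) (by omega) hc
    have hkn : k = q.length := by omega
    simp only
    rw [show ((i : Int) + 2) = (((i + 1 : Nat) : Int) + 1) by push_cast; ring,
        show ((i : Int) + 1) = ((i + 1 : Nat) : Int) by push_cast; ring, hk5]
    simp only [lvlLoop]
    have hged : ((k : Int) - 1) = ((k - 1 : Nat) : Int) := by omega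
    rw [hged, PySem.List.pyGetD_natCast]
    by_cases hv : 0 < value - Cc q (i + 1)
    · rw [if_pos hv]
      subst hkn
      rw [show sVal q i = sVal q (q.length - 1) by rw [hn], ← hiq]
      exact distribute_eq q (i + 1) value (by omega) (by omega) (by omega)
    · rw [if_neg hv]
      have hC0 : Cc q (i + 1) = Cc q k := by
        have h1 : Cc q (i + 1) ≤ Cc q k := Cc_mono q hpw (i + 1) k (by omega) (by omega) hk2
        omega
      have hveq : value - Cc q k = 0 := by omega
      rw [hveq]
      exact exhausted_eq q i k hpw (by omega) hk2 hC0
  | succ fuel ih =>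
    intro i hfuel hi hc
    have hi2 : i + 1 < q.length := by omega
    simp only [lvlLoop]
    obtain ⟨k, hk1, hk2, hk3, _hk4, hk5⟩ :=
      scan_spec q value (q.length - (i + 1)) (i + 1) rfl (by omega) (by omega) hc
    by_cases hv : 0 < value - Cc q (i + 1)
    · rw [if_pos hv]
      -- diff computation
      have hgp1 : (PySem.List.pyGetD (levelAll q (i + 1) (sVal q i)) ((i : Int) + 1) (0, 0)).1 =
          sVal q (i + 1) := by
        rw [show ((i : Int) + 1) = ((i + 1 : Nat) : Int) by push_cast; ring, PySem.List.pyGetD_natCast,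
            levelAll_getD q (i + 1) (sVal q i) (by omega) (i + 1) hi2, if_neg (by omega),
            ← sVal_eq q (i + 1) hi2]
      have hgp0 : (PySem.List.pyGetD (levelAll q (i + 1) (sVal q i)) ((i : Int)) (0, 0)).1 =
          sVal q i := by
        rw [PySem.List.pyGetD_natCast,
            levelAll_getD q (i + 1) (sVal q i) (by omega) i (by omega), if_pos (by omega)]
      rw [hgp1, hgp0]
      have hstep : Cc q (i + 2) = Cc q (i + 1) + ((i : Int) + 1) * (sVal q (i + 1) - sVal q i) := by
        have := Cc_step q (i + 1) (by omega) hi2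
        rw [show ((i + 1 : Nat) : Int) = (i : Int) + 1 by push_cast; ring] at this
        simpa using this
      by_cases hreq : (sVal q (i + 1) - sVal q i) * ((i : Int) + 1) ≤ value - Cc q (i + 1)
      · rw [if_pos hreq]
        -- continue: A moves to level i+2, scan takes one non-breaking step
        have hCc2 : Cc q (i + 2) ≤ value := by nlinarith [hstep, hreq]
        have hAstep : addFirst ((i : Int) + 1) (sVal q (i + 1) - sVal q i) (levelAll q (i + 1) (sVal q i)) =
            levelAll q (i + 2) (sVal q (i + 1)) := by
          rw [show ((i : Int) + 1) = ((i + 1 : Nat) : Int) by push_cast; ring,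
              addFirst_eq _ (i + 1) _ (by rw [levelAll_length' q _ _ (by omega)]; omega)]
          exact step_eq q i hi2
        rw [hAstep]
        have hvstep : value - Cc q (i + 1) - (sVal q (i + 1) - sVal q i) * ((i : Int) + 1) =
            value - Cc q (i + 2) := by rw [hstep]; ring
        rw [hvstep]
        -- scan: peel one element of the range
        have hrange : PySem.List.pyRange ((i : Int) + 2) ((q.length : Int) + 1) 1 =
            ((i : Int) + 2) :: PySem.List.pyRange ((i : Int) + 2 + 1) ((q.length : Int) + 1) 1 :=
          PySem.List.pyRange_one_cons (by omega)
        rw [hrange]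
        have hsm : (PySem.List.pyGetD q ((i : Int) + 2 - 1) (0, 0)).1 = sVal q (i + 1) := by
          rw [show ((i : Int) + 2 - 1) = ((i + 1 : Nat) : Int) by push_cast; ring,
              PySem.List.pyGetD_natCast]
          rfl
        have hc1 : ((i : Int) + 2) * sVal q (i + 1) - (preSum q (i + 1) + sVal q (i + 1)) =
            Cc q (i + 2) := by
          unfold Cc
          rw [preSum_succ q (i + 1) hi2]
          push_cast
          ring
        simp only [scanLoop, hsm]
        rw [hc1]
        rw [if_neg (show ¬ value < Cc q (i + 2) by omega)]
        have := ih (i + 1) (by omega) (by omega) hCc2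
        simp only at this
        rw [show ((i + 1 : Nat) : Int) = (i : Int) + 1 by push_cast; ring] at this
        rw [show ((i : Int) + 1 + 2) = (i : Int) + 2 + 1 by ring,
            show ((i : Int) + 1 + 1) = (i : Int) + 2 by ring] at this
        rw [show (i : Int) + 2 = ((i:Int) + 1) + 1 by ring, ← preSum_succ q (i + 1) hi2]
        exact this
      · rw [if_neg hreq]
        -- break: A distributes among the first i+1, scan breaks at i+2
        rw [lvlLoop_zero_v]
        simp only
        rw [if_neg (by omega)]
        have hrange : PySem.List.pyRange ((i : Int) + 2) ((q.length : Int) + 1) 1 =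
            ((i : Int) + 2) :: PySem.List.pyRange ((i : Int) + 2 + 1) ((q.length : Int) + 1) 1 :=
          PySem.List.pyRange_one_cons (by omega)
        rw [hrange]
        have hsm : (PySem.List.pyGetD q ((i : Int) + 2 - 1) (0, 0)).1 = sVal q (i + 1) := by
          rw [show ((i : Int) + 2 - 1) = ((i + 1 : Nat) : Int) by push_cast; ring,
              PySem.List.pyGetD_natCast]
          rfl
        have hc1 : ((i : Int) + 2) * sVal q (i + 1) - (preSum q (i + 1) + sVal q (i + 1)) =
            Cc q (i + 2) := by
          unfold Cc
          rw [preSum_succ q (i + 1) hi2]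
          push_cast
          ring
        simp only [scanLoop, hsm]
        have hbr2 : value < Cc q (i + 2) := by nlinarith [hstep]
        rw [hc1, if_pos hbr2]
        simp only
        have hd := distribute_eq q (i + 1) value (by omega) (by omega) (by omega)
        rw [show ((i + 1 : Nat) : Int) = (i : Int) + 1 by push_cast; ring] at hd
        rw [show ((i + 1 : Nat) - 1) = i by omega] at hd
        rw [show ((i : Int) + 1 - 1) = ((i : Nat) : Int) by ring, PySem.List.pyGetD_natCast]
        exact hd
    · rw [if_neg hv]
      rw [show ((i : Int) + 2) = (((i + 1 : Nat) : Int) + 1) by push_cast; ring,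
          show ((i : Int) + 1) = ((i + 1 : Nat) : Int) by push_cast; ring, hk5]
      simp only
      rw [if_neg hv]
      have hC0 : Cc q (i + 1) = Cc q k := by
        have h1 : Cc q (i + 1) ≤ Cc q k := Cc_mono q hpw (i + 1) k (by omega) (by omega) hk2
        omega
      have hveq : value - Cc q k = 0 := by omega
      have hged : ((k : Int) - 1) = ((k - 1 : Nat) : Int) := by omega
      rw [hged, PySem.List.pyGetD_natCast, hveq]
      exact exhausted_eq q i k hpw (by omega) hk2 hC0

theorem levelAll_one (q : List (Int × Int)) : levelAll q 1 (sVal q 0) = q := by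
  cases q with
  | nil => rfl
  | cons a t => simp [levelAll, sVal]

theorem Cc_one (q : List (Int × Int)) : Cc q 1 = 0 := by
  cases q with
  | nil => simp [Cc, sVal, preSum]
  | cons a t => simp [Cc, sVal, preSum]

theorem preSum_one (q : List (Int × Int)) : preSum q 1 = (PySem.List.pyGetD q 0 (0, 0)).1 := by
  cases q with
  | nil => simp [preSum, PySem.List.pyGetD, PySem.List.pyGet?]
  | cons a t => simp [preSum, PySem.List.pyGetD_zero_cons]

theorem lvlLoop_nonpos (p : List (Int × Int)) (v : Int) (i : Int) (fuel : Nat) (hv : ¬ 0 < v) :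
    lvlLoop p v i fuel = (p, v) := by
  cases fuel <;> simp [lvlLoop, hv]

-- ===== VERDICT (by name: the statement is the Claim_ definition above) =====
theorem levelList_spec : Claim_equal_levelList := by
  unfold Claim_equal_levelList
  intro lst value _hdom hpre
  unfold Spec_levelList levelList levelList_alt
  by_cases hv : value ≤ 0
  · rw [if_pos hv]
    simp only
    rw [lvlLoop_nonpos _ _ _ _ (by omega)]
    simp only
    rw [if_neg (by omega), restore_eq lst, List.map_map]
    have : ((fun x : Int × Int => x.1) ∘ (fun iv : Int × Int => (iv.2, iv.1))) =
        (fun iv : Int × Int => iv.2) := rfl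
    rw [this, PySem.List.map_snd_enumerate]
  · rw [if_neg hv]
    have hne : lst ≠ [] := by
      rcases hpre with h | h
      · exact h
      · omega
    set q := PySem.List.sorted2 ((PySem.List.enumerate lst).map (fun iv => (iv.2, iv.1)))
      Prod.fst Prod.snd with hqdef
    have hqlen : q.length = lst.length := by
      rw [hqdef, (PySem.List.sorted2_perm _ _ _ _).length_eq, List.length_map,
        PySem.List.length_enumerate]
    have hq1 : 1 ≤ q.length := by
      rw [hqlen]
      cases lst with
      | nil => exact absurd rfl hne
      | cons a t => simp
    have hm := main_lemma q value (pairwise_fst_sorted2 _) (q.length - 1) 0 (by omega)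
      (by omega) (by rw [Cc_one]; omega)
    simp only at hm
    rw [show ((0 : Nat) : Int) = (0 : Int) from rfl] at hm
    rw [levelAll_one, Cc_one, sub_zero] at hm
    rw [show ((0 : Int) + 2) = 2 by ring, show ((0 : Int) + 1) = 1 by ring] at hm
    rw [show (0 + 1 : Nat) = 1 from rfl, preSum_one] at hm
    simp only
    rw [hm]
    unfold assignK
    rfl
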